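-- pv_equiv track=rewrite | github.com/marwinhaddad/DD2352-Algorithms-and-Complexity | MT2/P2/main.py | canGenerate
-- ===== SOURCE A (Python) =====
-- def canGenerate(x, y):
--     if len(x) == 1:
--         return x[0] == y
--     for i in range(len(x)):
--         if (canGenerate(x[:i] + x[i + 1:], y - x[i])
--                 or canGenerate(x[:i] + x[i + 1:], y // x[i])):
--             return True
--     return False
-- ===== SOURCE B (Python) =====
-- def canGenerate(x, y):
--     # Dynamic programming: memoize the search on (remaining subsequence, target),
--     # collapsing the factorially many removal orders that reach the same state.
--     memo = {}
--
--     def go(xs, t):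
--         if len(xs) == 1:
--             return xs[0] == t
--         key = (xs, t)
--         if key in memo:
--             return memo[key]
--         res = False
--         for i in range(len(xs)):
--             rest = xs[:i] + xs[i + 1:]
--             if go(rest, t - xs[i]) or go(rest, t // xs[i]):
--                 res = True
--                 break
--         memo[key] = res
--         return res
--
--     return go(tuple(x), y)
-- ===== Notes on version B (the rewrite author's own statement) =====
-- stated objective: faster
-- what changed: B replaces A's naive factorial recursion by dynamic programming: the search is memoized on (remaining subsequence, target), so the factorially many removal orders that lead to the same remaining elements and target are computed once.
-- outside the precondition, e.g. on canGenerate([0, 5], 5): A returns True, B returns True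
import Mathlib
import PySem

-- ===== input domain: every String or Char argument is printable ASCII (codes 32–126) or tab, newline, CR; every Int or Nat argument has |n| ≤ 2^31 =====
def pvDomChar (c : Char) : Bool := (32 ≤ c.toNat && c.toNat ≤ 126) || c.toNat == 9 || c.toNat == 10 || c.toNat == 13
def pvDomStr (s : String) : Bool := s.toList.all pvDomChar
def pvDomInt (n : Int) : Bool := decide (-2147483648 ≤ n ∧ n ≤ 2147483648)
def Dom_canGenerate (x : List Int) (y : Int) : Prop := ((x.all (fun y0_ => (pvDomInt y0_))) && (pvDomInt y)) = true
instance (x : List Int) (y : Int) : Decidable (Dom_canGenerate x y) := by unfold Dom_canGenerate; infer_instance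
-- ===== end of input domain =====

-- B replaces A's naive factorial recursion by memoizing the search on (remaining subsequence, target) — dynamic programming; asymptotically faster.

-- ===== PORT A =====
-- Literal port of A: indices i come from range(len(x)), so x[i] is in range and
-- x[:i] + x[i+1:] is x.take i ++ x.drop (i+1) (exact for 0 ≤ i).
def canGenerate (x : List Int) (y : Int) : Bool :=
  if x.length = 1 then x.getD 0 0 == y
  else (List.range x.length).attach.any (fun i =>
    canGenerate (x.take i.1 ++ x.drop (i.1 + 1)) (y - x.getD i.1 0)
    || canGenerate (x.take i.1 ++ x.drop (i.1 + 1)) (PySem.Int.floordiv y (x.getD i.1 0)))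
termination_by x.length
decreasing_by
  all_goals
    have hi := List.mem_range.mp i.2
    simp only [List.length_append, List.length_take, List.length_drop]
    omega

-- ===== PORT B =====
-- Port of Source B's `go`/its for-loop, threading the memo dict through as state.
-- `fuel` only makes the recursion structural: it starts at x.length and is never
-- exhausted on a reachable state (recursion stops at length 1).
mutual
def altGo : Nat → List Int → Int → PySem.Dict (List Int × Int) Bool →
    Bool × PySem.Dict (List Int × Int) Bool
  | fuel, xs, t, memo =>
    if xs.length = 1 then (xs.getD 0 0 == t, memo)
    else
      match PySem.Dict.get? memo (xs, t) with
      | some b => (b, memo)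
      | none =>
        match fuel with
        | 0 => (false, memo)
        | Nat.succ fuel' =>
          let r := altLoop fuel' xs t (List.range xs.length) memo
          (r.1, PySem.Dict.insert r.2 (xs, t) r.1)
  termination_by fuel _ _ _ => (fuel, 0, 0)

def altLoop : Nat → List Int → Int → List Nat → PySem.Dict (List Int × Int) Bool →
    Bool × PySem.Dict (List Int × Int) Bool
  | _, _, _, [], memo => (false, memo)
  | fuel, xs, t, i :: is, memo =>
    let rest := xs.take i ++ xs.drop (i + 1)
    let r1 := altGo fuel rest (t - xs.getD i 0) memo
    if r1.1 then (true, r1.2)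
    else
      let r2 := altGo fuel rest (PySem.Int.floordiv t (xs.getD i 0)) r1.2
      if r2.1 then (true, r2.2)
      else altLoop fuel xs t is r2.2
  termination_by fuel _ _ is _ => (fuel, 1, is.length)
end

def canGenerate_alt (x : List Int) (y : Int) : Bool :=
  (altGo x.length x y PySem.Dict.empty).1

-- ===== PRECONDITION & SPEC =====
-- Pre_ excludes lists containing 0: on those, `y // 0` can raise ZeroDivisionError in
-- both Pythons (whether it does depends on the search order; on some such inputs both
-- still return, see the cited excluded example).
def Pre_canGenerate (x : List Int) (y : Int) : Prop := (0 : Int) ∉ x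
instance (x : List Int) (y : Int) : Decidable (Pre_canGenerate x y) := by
  unfold Pre_canGenerate; infer_instance
def pvWitness_canGenerate : List Int × Int := ([1, 2], 3)

def Spec_canGenerate (x : List Int) (y : Int) (out : Bool) : Prop := out = canGenerate_alt x y
instance (x : List Int) (y : Int) (out : Bool) : Decidable (Spec_canGenerate x y out) := by
  unfold Spec_canGenerate; infer_instance

-- ===== CLAIM (what is proved, stated in full; the proofs are below) =====
def Claim_equal_canGenerate : Prop := ∀ (x : List Int) (y : Int), Dom_canGenerate x y → Pre_canGenerate x y → Spec_canGenerate x y (canGenerate x y)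

-- ===== LEMMAS AND PROOFS =====

-- A memo is good when every stored value is the (A-)answer for its key.
def GoodMemo (memo : PySem.Dict (List Int × Int) Bool) : Prop :=
  ∀ k b, memo.get? k = some b → b = canGenerate k.1 k.2

lemma canGenerate_of_ne_one {xs : List Int} {t : Int} (h : xs.length ≠ 1) :
    canGenerate xs t = (List.range xs.length).any (fun i =>
      canGenerate (xs.take i ++ xs.drop (i + 1)) (t - xs.getD i 0)
      || canGenerate (xs.take i ++ xs.drop (i + 1)) (PySem.Int.floordiv t (xs.getD i 0))) := by
  rw [canGenerate]
  rw [if_neg h]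
  simp [List.any_eq]

lemma length_rest {xs : List Int} {i : Nat} (h : i < xs.length) :
    (xs.take i ++ xs.drop (i + 1)).length = xs.length - 1 := by
  simp only [List.length_append, List.length_take, List.length_drop]
  omega

lemma altLoop_correct_of (f : Nat)
    (hgo : ∀ xs t memo, xs.length ≤ f + 1 → GoodMemo memo →
      (altGo f xs t memo).1 = canGenerate xs t ∧ GoodMemo (altGo f xs t memo).2) :
    ∀ (xs : List Int) (t : Int) (is : List Nat) memo,
      (∀ i ∈ is, i < xs.length) → xs.length ≤ f + 2 → GoodMemo memo →
      (altLoop f xs t is memo).1 = is.any (fun i =>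
        canGenerate (xs.take i ++ xs.drop (i + 1)) (t - xs.getD i 0)
        || canGenerate (xs.take i ++ xs.drop (i + 1)) (PySem.Int.floordiv t (xs.getD i 0)))
      ∧ GoodMemo (altLoop f xs t is memo).2 := by
  intro xs t is
  induction is with
  | nil => intro memo _ _ good; rw [altLoop]; simpa using good
  | cons i is ihis =>
    intro memo hlt hlen good
    have hi : i < xs.length := hlt i (List.mem_cons_self ..)
    have hrest : (xs.take i ++ xs.drop (i + 1)).length ≤ f + 1 := by
      rw [length_rest hi]; omega
    have h1 := hgo (xs.take i ++ xs.drop (i + 1)) (t - xs.getD i 0) memo hrest good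
    rw [altLoop]
    by_cases hb1 : (altGo f (xs.take i ++ xs.drop (i + 1)) (t - xs.getD i 0) memo).1 = true
    · rw [if_pos hb1]
      refine ⟨?_, h1.2⟩
      simp only [List.any_cons, ← h1.1, hb1, Bool.true_or, Bool.true_or]
    · rw [if_neg hb1]
      have h2 := hgo (xs.take i ++ xs.drop (i + 1)) (PySem.Int.floordiv t (xs.getD i 0))
        (altGo f (xs.take i ++ xs.drop (i + 1)) (t - xs.getD i 0) memo).2 hrest h1.2
      by_cases hb2 : (altGo f (xs.take i ++ xs.drop (i + 1)) (PySem.Int.floordiv t (xs.getD i 0))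
          (altGo f (xs.take i ++ xs.drop (i + 1)) (t - xs.getD i 0) memo).2).1 = true
      · rw [if_pos hb2]
        refine ⟨?_, h2.2⟩
        simp only [List.any_cons, ← h1.1, ← h2.1, hb2, Bool.eq_false_iff.mpr hb1]
        simp
      · rw [if_neg hb2]
        have ih := ihis _ (fun j hj => hlt j (List.mem_cons_of_mem _ hj)) hlen h2.2
        refine ⟨?_, ih.2⟩
        simp only [List.any_cons, ← h1.1, ← h2.1,
          Bool.eq_false_iff.mpr hb1, Bool.eq_false_iff.mpr hb2, Bool.false_or]
        exact ih.1

lemma altGo_correct : ∀ (fuel : Nat) (xs : List Int) (t : Int) memo,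
    xs.length ≤ fuel + 1 → GoodMemo memo →
    (altGo fuel xs t memo).1 = canGenerate xs t ∧ GoodMemo (altGo fuel xs t memo).2 := by
  intro fuel
  induction fuel with
  | zero =>
    intro xs t memo hlen good
    rw [altGo]
    by_cases h1 : xs.length = 1
    · rw [if_pos h1]
      refine ⟨?_, good⟩
      rw [canGenerate, if_pos h1]
    · rw [if_neg h1]
      cases hmem : PySem.Dict.get? memo (xs, t) with
      | some b => exact ⟨good (xs, t) b hmem, good⟩
      | none =>
        have hxs : xs = [] := List.length_eq_zero_iff.mp (by omega)
        refine ⟨?_, good⟩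
        rw [canGenerate_of_ne_one h1, hxs]
        simp
  | succ f ih =>
    intro xs t memo hlen good
    rw [altGo]
    by_cases h1 : xs.length = 1
    · rw [if_pos h1]
      refine ⟨?_, good⟩
      rw [canGenerate, if_pos h1]
    · rw [if_neg h1]
      cases hmem : PySem.Dict.get? memo (xs, t) with
      | some b => exact ⟨good (xs, t) b hmem, good⟩
      | none =>
        have hloop := altLoop_correct_of f ih xs t (List.range xs.length) memo
          (fun i hi => List.mem_range.mp hi) (by omega) good
        have hval : (altLoop f xs t (List.range xs.length) memo).1 = canGenerate xs t := by
          rw [hloop.1, canGenerate_of_ne_one h1]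
        refine ⟨hval, ?_⟩
        intro k b hb
        rw [PySem.Dict.get?_insert] at hb
        by_cases hk : k = (xs, t)
        · rw [if_pos hk] at hb
          cases hb
          rw [hk]
          exact hval
        · rw [if_neg hk] at hb
          exact hloop.2 k b hb

-- ===== VERDICT (by name: the statement is the Claim_ definition above) =====
theorem canGenerate_spec : Claim_equal_canGenerate := by
  intro x y _ _
  unfold Spec_canGenerate canGenerate_alt
  have h := altGo_correct x.length x y PySem.Dict.empty (by omega)
    (by intro k b hb; simp [PySem.Dict.get?_empty] at hb)
  exact h.1.symm
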